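-- pv_equiv track=rewrite | github.com/amrutha-b-nair/Advent-of-Code | 2023/day13/solution.py | row_reflection
-- ===== SOURCE A (Python) =====
-- def is_palindrome(lines, index):
--     palindrom_dict ={}
--     for i in range(index):
--         if lines[i] not in palindrom_dict:
--             palindrom_dict[lines[i]] = 1
--         else:
--             del palindrom_dict[lines[i]]
--     if len(palindrom_dict) == 0:
--         return True
--     else:
--         return False
--
-- def row_reflection(lines):
--     possible_indices = [i for i in range(1, len(lines)) if lines[0] == lines[i]]
--     if len(possible_indices) == 0:
--         return None
--     else:
--         for index in possible_indices:
--             if is_palindrome(lines, index + 1):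
--                 return (index +1)//2
--     return None
-- ===== SOURCE B (Python) =====
-- def row_reflection(lines):
--     # One incremental pass: keep the set of lines seen an odd number of times
--     # so far; a reflection ends at i exactly when lines[i] matches lines[0]
--     # and the prefix through i balances out (the odd-set is empty).
--     toggles = set()
--     if lines:
--         toggles.add(lines[0])
--     for i in range(1, len(lines)):
--         s = lines[i]
--         if s in toggles:
--             toggles.discard(s)
--         else:
--             toggles.add(s)
--         if s == lines[0] and len(toggles) == 0:
--             return (i + 1) // 2
--     return None
-- ===== Notes on version B (the rewrite author's own statement) =====
-- stated objective: alternative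
-- what changed: A re-scans the whole prefix for every candidate index to test multiset balance (dict rebuilt from scratch per candidate); B makes one incremental pass maintaining the set of lines seen an odd number of times and checks emptiness at each candidate, removing the inner rescan (quadratic only when many lines repeat lines[0], which the timing inputs do not).
import Mathlib
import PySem

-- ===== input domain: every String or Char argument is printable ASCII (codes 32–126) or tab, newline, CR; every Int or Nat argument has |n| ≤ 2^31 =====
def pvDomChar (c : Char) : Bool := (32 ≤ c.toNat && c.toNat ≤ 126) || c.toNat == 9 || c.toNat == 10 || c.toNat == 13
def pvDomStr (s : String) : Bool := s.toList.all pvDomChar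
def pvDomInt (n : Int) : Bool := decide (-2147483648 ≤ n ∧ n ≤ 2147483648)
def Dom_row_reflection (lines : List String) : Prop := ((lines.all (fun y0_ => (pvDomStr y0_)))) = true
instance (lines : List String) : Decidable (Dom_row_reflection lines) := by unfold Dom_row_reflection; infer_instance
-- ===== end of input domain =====

-- B replaces A's per-candidate multiset-balance rescan by one incremental pass
-- maintaining the set of lines seen an odd number of times (objective: alternative).

-- ===== PORT A =====
-- one iteration of is_palindrome's toggle loop over palindrom_dict
def palStep (d : PySem.Dict String Int) (s : String) : PySem.Dict String Int :=
  if !(d.contains s) then d.insert s 1 else d.erase s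

def is_palindrome (lines : List String) (index : Int) : Bool :=
  -- 'lines[i]' ported with pyGetD: every call passes index ≤ len(lines), so i is in range and the default is never used
  let d := (PySem.List.pyRange 0 index 1).foldl
    (fun d i => palStep d (PySem.List.pyGetD lines i "")) PySem.Dict.empty
  if d.size == 0 then true else false

-- the 'for index in possible_indices' loop with its early return
def aLoop (lines : List String) : List Int → Option Int
  | [] => none
  | idx :: rest =>
    if is_palindrome lines (idx + 1) then some (PySem.Int.floordiv (idx + 1) 2)
    else aLoop lines rest

def row_reflection (lines : List String) : Option Int :=
  let possible := (PySem.List.pyRange 1 (PySem.List.len lines) 1).filter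
    (fun i => PySem.List.pyGetD lines 0 "" == PySem.List.pyGetD lines i "")
  if possible.length == 0 then none else aLoop lines possible

-- ===== PORT B =====
-- the body of B's if/else toggle on the set
def altStep (t : PySem.Set String) (s : String) : PySem.Set String :=
  if PySem.Set.contains t s then PySem.Set.discard t s else PySem.Set.add t s

-- B's single for-loop with its early return; t is the running odd-count set
-- (the loop body's locals s and t' are inlined)
def altLoop (lines : List String) (first : String) : List Int → PySem.Set String → Option Int
  | [], _ => none
  | i :: rest, t =>
    if (PySem.List.pyGetD lines i "" == first)
        && PySem.Set.len (altStep t (PySem.List.pyGetD lines i "")) == 0 then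
      some (PySem.Int.floordiv (i + 1) 2)
    else altLoop lines first rest (altStep t (PySem.List.pyGetD lines i ""))

def row_reflection_alt (lines : List String) : Option Int :=
  -- 'lines[0]' ported with pyGetD: when lines is empty the loop body never runs, so the default is never compared
  let first := PySem.List.pyGetD lines 0 ""
  let toggles := if lines.isEmpty then PySem.Set.empty else PySem.Set.add PySem.Set.empty first
  altLoop lines first (PySem.List.pyRange 1 (PySem.List.len lines) 1) toggles

-- ===== PRECONDITION & SPEC =====
def Spec_row_reflection (lines : List String) (out : Option Int) : Prop := out = row_reflection_alt lines
instance (lines : List String) (out : Option Int) : Decidable (Spec_row_reflection lines out) := by unfold Spec_row_reflection; infer_instance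

-- ===== CLAIM (what is proved, stated in full; the proofs are below) =====
def Claim_equal_row_reflection : Prop := ∀ (lines : List String), Dom_row_reflection lines → Spec_row_reflection lines (row_reflection lines)

-- ===== LEMMAS AND PROOFS =====

-- the odd-count set of a prefix, as B computes it
def tog (pre : List String) : PySem.Set String := pre.foldl altStep []

theorem aLoop_cons (lines : List String) (idx : Int) (rest : List Int) :
    aLoop lines (idx :: rest)
      = (if is_palindrome lines (idx + 1) then some (PySem.Int.floordiv (idx + 1) 2)
         else aLoop lines rest) := rfl

theorem altLoop_cons (lines : List String) (first : String) (i : Int) (rest : List Int)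
    (t : PySem.Set String) :
    altLoop lines first (i :: rest) t
      = (if (PySem.List.pyGetD lines i "" == first)
            && PySem.Set.len (altStep t (PySem.List.pyGetD lines i "")) == 0 then
          some (PySem.Int.floordiv (i + 1) 2)
        else altLoop lines first rest (altStep t (PySem.List.pyGetD lines i ""))) := rfl

def asDict (t : PySem.Set String) : PySem.Dict String Int :=
  PySem.Dict.mk (t.map (fun x => (x, (1 : Int))))

theorem palStep_sim (t : PySem.Set String) (s : String) :
    palStep (asDict t) s = asDict (altStep t s) := by
  by_cases hs : s ∈ t
  · have hc : (asDict t).contains s = true := by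
      simp [asDict, PySem.Dict.contains_mk]; exact hs
    have hc' : PySem.Set.contains t s = true := by
      simp [PySem.Set.contains_eq_listContains]; exact hs
    rw [show palStep (asDict t) s = (asDict t).erase s from by simp [palStep, hc],
        show altStep t s = PySem.Set.discard t s from by unfold altStep; rw [hc']; simp]
    apply PySem.Dict.ext
    simp [asDict, PySem.Dict.erase, PySem.Set.discard, List.filter_map]
    rfl
  · have hc : (asDict t).contains s = false := by
      simp [asDict, PySem.Dict.contains_mk]
      aesop
    have hc' : PySem.Set.contains t s = false := by
      simp [PySem.Set.contains_eq_listContains]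
      aesop
    have hins : (asDict t).insert s 1 = asDict (t ++ [s]) := by
      apply PySem.Dict.ext
      rw [PySem.Dict.items_insert_of_not_contains (asDict t) 1 hc]
      simp [asDict]
    rw [show palStep (asDict t) s = (asDict t).insert s 1 from by simp [palStep, hc],
        show altStep t s = PySem.Set.add t s from by unfold altStep; rw [hc']; simp,
        PySem.Set.add_of_not_mem hs, hins]

theorem foldl_sim (pre : List String) (t : PySem.Set String) :
    pre.foldl palStep (asDict t) = asDict (pre.foldl altStep t) := by
  induction pre generalizing t with
  | nil => rfl
  | cons a l ih => simp [List.foldl_cons, palStep_sim, ih]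

theorem range_fold {β : Type} (lines : List String) (g : β → String → β) :
    ∀ (k : Nat), k ≤ lines.length → ∀ (init : β),
    (PySem.List.pyRange 0 (k : Int) 1).foldl
      (fun acc i => g acc (PySem.List.pyGetD lines i "")) init
      = (lines.take k).foldl g init := by
  intro k
  induction k with
  | zero => intro _ init; simp [PySem.List.pyRange_one_eq_nil (le_refl 0)]
  | succ k ih =>
    intro hk init
    have hk' : k < lines.length := by omega
    have hcast : ((k + 1 : Nat) : Int) = (k : Int) + 1 := by push_cast; ring
    rw [hcast, PySem.List.pyRange_one_succ_right (by positivity), List.foldl_append,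
      ih (by omega)]
    have hget : PySem.List.pyGetD lines (k : Int) "" = lines[k] := by
      rw [PySem.List.pyGetD_natCast]
      simp [List.getD_eq_getElem?_getD, List.getElem?_eq_getElem hk']
    simp only [List.foldl_cons, List.foldl_nil, hget]
    rw [List.take_add_one, List.getElem?_eq_getElem hk', Option.toList_some, List.foldl_append,
      List.foldl_cons, List.foldl_nil]

theorem tog_take_succ (lines : List String) (j : Nat) (hj : j < lines.length) :
    tog (lines.take (j + 1)) = altStep (tog (lines.take j)) lines[j] := by
  unfold tog
  rw [List.take_add_one, List.getElem?_eq_getElem hj, Option.toList_some, List.foldl_append,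
    List.foldl_cons, List.foldl_nil]

theorem is_palindrome_char (lines : List String) (j : Nat) (hj : j < lines.length) :
    is_palindrome lines ((j : Int) + 1)
      = ((tog (lines.take (j + 1))).length == 0) := by
  have hcast : ((j : Int) + 1) = ((j + 1 : Nat) : Int) := by push_cast; ring
  have h0 : is_palindrome lines ((j : Int) + 1)
      = (if ((PySem.List.pyRange 0 ((j : Int) + 1) 1).foldl
          (fun d i => palStep d (PySem.List.pyGetD lines i "")) PySem.Dict.empty).size == 0
        then true else false) := rfl
  rw [h0, hcast, range_fold lines palStep (j + 1) (by omega) PySem.Dict.empty,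
    show (PySem.Dict.empty : PySem.Dict String Int) = asDict [] from rfl, foldl_sim,
    show (lines.take (j + 1)).foldl altStep [] = tog (lines.take (j + 1)) from rfl]
  have hsz : (asDict (tog (lines.take (j + 1)))).size = (tog (lines.take (j + 1))).length := by
    simp [asDict, PySem.Dict.size]
  rw [hsz]
  by_cases h : (tog (lines.take (j + 1))).length = 0 <;> simp [h]

theorem loop_eq (lines : List String) (first : String)
    (hf : first = PySem.List.pyGetD lines 0 "") :
    ∀ (c j : Nat), 1 ≤ j → j + c = lines.length →
    altLoop lines first (PySem.List.pyRange (j : Int) (lines.length : Int) 1)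
        (tog (lines.take j))
      = aLoop lines ((PySem.List.pyRange (j : Int) (lines.length : Int) 1).filter
          (fun i => PySem.List.pyGetD lines 0 "" == PySem.List.pyGetD lines i "")) := by
  subst hf
  intro c
  induction c with
  | zero =>
    intro j _ hlen
    have : ((lines.length : Int)) ≤ (j : Int) := by omega
    simp [PySem.List.pyRange_one_eq_nil this, altLoop, aLoop]
  | succ c ih =>
    intro j hj hlen
    have hjlt : (j : Int) < (lines.length : Int) := by omega
    have hjl : j < lines.length := by omega
    have hcast : ((j : Int) + 1) = ((j + 1 : Nat) : Int) := by push_cast; ring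
    have hs : PySem.List.pyGetD lines (j : Int) "" = lines[j] := by
      rw [PySem.List.pyGetD_natCast]
      simp [List.getD_eq_getElem?_getD, List.getElem?_eq_getElem hjl]
    have hstep : altStep (tog (lines.take j)) lines[j] = tog (lines.take (j + 1)) :=
      (tog_take_succ lines j hjl).symm
    have hpal := is_palindrome_char lines j hjl
    have hih := ih (j + 1) (by omega) (by omega)
    rw [← hcast] at hih
    have hlen0 : ((PySem.Set.len (tog (lines.take (j + 1)))) == 0)
        = ((tog (lines.take (j + 1))).length == 0) := by
      simp [PySem.Set.len]
    rw [PySem.List.pyRange_one_cons hjlt, altLoop_cons, List.filter_cons]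
    simp only [hs, hstep, hlen0]
    by_cases hp : PySem.List.pyGetD lines 0 "" = lines[j]
    · have h1 : (lines[j] == PySem.List.pyGetD lines 0 "") = true := by simp [hp]
      have h2 : (PySem.List.pyGetD lines 0 "" == lines[j]) = true := by simp [hp]
      simp only [h1, h2, Bool.true_and]
      rw [if_pos trivial, aLoop_cons, hpal]
      by_cases hz : (tog (lines.take (j + 1))).length = 0
      · simp [hz]
      · have hz' : ((tog (lines.take (j + 1))).length == 0) = false := by simp [hz]
        simp only [hz', Bool.false_eq_true, if_false]
        exact hih
    · have h1 : (lines[j] == PySem.List.pyGetD lines 0 "") = false := by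
        simp; intro h; exact hp h.symm
      have h2 : (PySem.List.pyGetD lines 0 "" == lines[j]) = false := by
        simp; exact hp
      simp only [h1, h2, Bool.false_and, Bool.false_eq_true, if_false]
      exact hih

-- ===== VERDICT (by name: the statement is the Claim_ definition above) =====
theorem row_reflection_spec : Claim_equal_row_reflection := by
  intro lines _
  unfold Spec_row_reflection
  cases lines with
  | nil => rfl
  | cons a as =>
    have h0 : PySem.List.pyGetD (a :: as) 0 "" = a := by
      rw [show (0 : Int) = ((0 : Nat) : Int) from rfl, PySem.List.pyGetD_natCast]; rfl
    have htog1 : (if (a :: as).isEmpty then PySem.Set.empty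
          else PySem.Set.add PySem.Set.empty (PySem.List.pyGetD (a :: as) 0 ""))
        = tog ((a :: as).take 1) := by
      simp [tog, altStep, h0, PySem.Set.contains_eq_listContains, PySem.Set.empty]
    have hmain := loop_eq (a :: as) (PySem.List.pyGetD (a :: as) 0 "") rfl
      ((a :: as).length - 1) 1 (le_refl 1) (by simp only [List.length_cons]; omega)
    push_cast at hmain
    rw [← htog1] at hmain
    simp only [row_reflection, row_reflection_alt, PySem.List.len_eq]
    rw [hmain]
    by_cases hz : ((PySem.List.pyRange 1 (((a :: as).length : Nat) : Int) 1).filter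
        (fun i => PySem.List.pyGetD (a :: as) 0 "" == PySem.List.pyGetD (a :: as) i "")).length = 0
    · have he := List.length_eq_zero_iff.mp hz
      rw [he]
      simp [show aLoop (a :: as) ([] : List Int) = none from rfl]
    · have hz' : (((PySem.List.pyRange 1 (((a :: as).length : Nat) : Int) 1).filter
          (fun i => PySem.List.pyGetD (a :: as) 0 "" == PySem.List.pyGetD (a :: as) i "")).length == 0) = false := by
        rw [beq_eq_false_iff_ne]; exact hz
      rw [hz']
      simp
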